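-- pv_equiv track=rewrite | github.com/Sun-Ke/manim-projects | Heap/heap.py | gen_ncb
-- ===== SOURCE A (Python) =====
-- def gen_ncb(n):
--     edges = []
--     for i in range(n):
--         if i + 1 < n // 2:
--             edges.append([2 * (i + 1) - 1, 2 * (i + 1) + 1 - 1])
--         elif i + 1 == n // 2:
--             if 2 * (i + 1) + 1 <= n:
--                 edges.append([2 * (i + 1) - 1, 2 * (i + 1) + 1 - 1])
--             else:
--                 edges.append([2 * (i + 1) - 1])
--         else:
--             edges.append([])
--     return edges
-- ===== SOURCE B (Python) =====
-- def gen_ncb(n):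
--     edges = [[] for _ in range(n)]
--     for c in range(1, n):
--         edges[(c - 1) // 2].append(c)
--     return edges
-- ===== Notes on version B (the rewrite author's own statement) =====
-- stated objective: simpler
-- what changed: Instead of looping over parents and computing each parent's children with floor-halving branch analysis, B pre-allocates empty child lists and loops over the child nodes, bucketing each child under its parent index.
import Mathlib
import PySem

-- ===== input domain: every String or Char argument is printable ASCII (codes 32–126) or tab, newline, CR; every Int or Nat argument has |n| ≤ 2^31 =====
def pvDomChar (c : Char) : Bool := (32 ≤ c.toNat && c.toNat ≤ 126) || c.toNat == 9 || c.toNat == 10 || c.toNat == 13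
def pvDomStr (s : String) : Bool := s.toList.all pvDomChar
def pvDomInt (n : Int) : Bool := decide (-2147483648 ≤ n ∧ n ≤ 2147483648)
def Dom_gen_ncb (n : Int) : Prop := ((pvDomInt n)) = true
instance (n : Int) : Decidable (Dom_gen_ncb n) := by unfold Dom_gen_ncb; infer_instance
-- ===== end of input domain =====

-- B builds the heap child-edge lists by bucketing each child under its parent instead of
-- computing each parent's children with branch analysis (objective: simpler).

-- ===== PORT A =====
def gen_ncb (n : Int) : List (List Int) :=
  (PySem.List.pyRange 0 n 1).foldl
    (fun edges i =>
      if i + 1 < PySem.Int.floordiv n 2 then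
        edges ++ [[2 * (i + 1) - 1, 2 * (i + 1) + 1 - 1]]
      else if i + 1 = PySem.Int.floordiv n 2 then
        if 2 * (i + 1) + 1 ≤ n then
          edges ++ [[2 * (i + 1) - 1, 2 * (i + 1) + 1 - 1]]
        else
          edges ++ [[2 * (i + 1) - 1]]
      else
        edges ++ [[]]) []

-- ===== PORT B =====
-- loop body of B: edges[(c-1)//2].append(c); the index (c-1)//2 is nonnegative and in
-- range for every c produced by range(1, n), so .toNat / .set / .getD are exact here
def bStep (edges : List (List Int)) (c : Int) : List (List Int) :=
  edges.set (PySem.Int.floordiv (c - 1) 2).toNat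
    (edges.getD (PySem.Int.floordiv (c - 1) 2).toNat [] ++ [c])

def gen_ncb_alt (n : Int) : List (List Int) :=
  (PySem.List.pyRange 1 n 1).foldl bStep
    ((PySem.List.pyRange 0 n 1).map (fun _ => ([] : List Int)))

-- ===== PRECONDITION & SPEC =====
def Spec_gen_ncb (n : Int) (out : List (List Int)) : Prop := out = gen_ncb_alt n
instance (n : Int) (out : List (List Int)) : Decidable (Spec_gen_ncb n out) := by unfold Spec_gen_ncb; infer_instance

-- ===== CLAIM (what is proved, stated in full; the proofs are below) =====
def Claim_equal_gen_ncb : Prop := ∀ (n : Int), Dom_gen_ncb n → Spec_gen_ncb n (gen_ncb n)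

-- ===== LEMMAS AND PROOFS =====

-- children of node i that are < k (both programs' common characterisation)
def gChild (k i : Int) : List Int :=
  (if 2 * i + 1 < k then [2 * i + 1] else []) ++ (if 2 * i + 2 < k then [2 * i + 2] else [])

def Ledges (n k : Int) : List (List Int) := (PySem.List.pyRange 0 n 1).map (gChild k)

lemma gen_ncb_eq_map (n : Int) :
    gen_ncb n = (PySem.List.pyRange 0 n 1).map (fun i =>
      if i + 1 < PySem.Int.floordiv n 2 then [2 * (i + 1) - 1, 2 * (i + 1) + 1 - 1]
      else if i + 1 = PySem.Int.floordiv n 2 then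
        if 2 * (i + 1) + 1 ≤ n then [2 * (i + 1) - 1, 2 * (i + 1) + 1 - 1]
        else [2 * (i + 1) - 1]
      else []) := by
  unfold gen_ncb
  rw [show (fun (edges : List (List Int)) (i : Int) =>
      if i + 1 < PySem.Int.floordiv n 2 then
        edges ++ [[2 * (i + 1) - 1, 2 * (i + 1) + 1 - 1]]
      else if i + 1 = PySem.Int.floordiv n 2 then
        if 2 * (i + 1) + 1 ≤ n then
          edges ++ [[2 * (i + 1) - 1, 2 * (i + 1) + 1 - 1]]
        else
          edges ++ [[2 * (i + 1) - 1]]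
      else
        edges ++ [[]]) =
    (fun (edges : List (List Int)) (i : Int) => edges ++ [if i + 1 < PySem.Int.floordiv n 2 then [2 * (i + 1) - 1, 2 * (i + 1) + 1 - 1]
      else if i + 1 = PySem.Int.floordiv n 2 then
        if 2 * (i + 1) + 1 ≤ n then [2 * (i + 1) - 1, 2 * (i + 1) + 1 - 1]
        else [2 * (i + 1) - 1]
      else []]) from by funext edges i; split_ifs <;> rfl]
  rw [PySem.List.foldl_append_singleton_eq_map]
  simp

lemma gen_ncb_eq_Ledges (n : Int) : gen_ncb n = Ledges n n := by
  rw [gen_ncb_eq_map]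
  unfold Ledges
  apply List.map_congr_left
  intro i hi
  rw [PySem.List.mem_pyRange_one] at hi
  have hn : (0:Int) < n := by omega
  rw [PySem.Int.floordiv_eq_ediv_of_pos (by omega : (0:Int) < 2)]
  unfold gChild
  split_ifs <;> simp_all <;> omega

lemma init_eq_Ledges (n : Int) :
    (PySem.List.pyRange 0 n 1).map (fun _ => ([] : List Int)) = Ledges n 1 := by
  unfold Ledges
  apply List.map_congr_left
  intro i hi
  rw [PySem.List.mem_pyRange_one] at hi
  unfold gChild
  split_ifs <;> simp_all <;> omega

lemma bStep_Ledges (n k : Int) (h1 : 1 ≤ k) (h2 : k < n) :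
    bStep (Ledges n k) k = Ledges n (k + 1) := by
  have hq : (0:Int) ≤ (k - 1) / 2 := by omega
  obtain ⟨q, hqdef⟩ : ∃ q : Nat, q = (PySem.Int.floordiv (k - 1) 2).toNat := ⟨_, rfl⟩
  have hqe : (q : Int) = (k - 1) / 2 := by
    rw [hqdef, PySem.Int.floordiv_eq_ediv_of_pos (by omega : (0:Int) < 2)]
    omega
  have hk : k = 2 * (q : Int) + 1 ∨ k = 2 * (q : Int) + 2 := by omega
  have hlen : (Ledges n k).length = (n - 0).toNat := by
    unfold Ledges; simp [PySem.List.length_pyRange_one]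
  have hql : q < (Ledges n k).length := by rw [hlen]; omega
  have hget : ∀ (m : Int) (j : Nat) (hj : j < (Ledges n m).length), (Ledges n m)[j] = gChild m j := by
    intro m j hj
    unfold Ledges at hj ⊢
    simp only [List.getElem_map]
    rw [PySem.List.getElem_pyRange_one]
    simp
  unfold bStep
  rw [← hqdef]
  rw [List.getD_eq_getElem _ _ hql, hget k q hql]
  apply List.ext_getElem
  · simp [Ledges, PySem.List.length_pyRange_one]
  · intro j hj hj'
    rw [List.getElem_set, hget (k+1) j hj']
    by_cases hjq : q = j
    · subst hjq
      rw [if_pos rfl]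
      unfold gChild
      rcases hk with hk | hk <;> subst hk <;> split_ifs <;>
        (first | rfl | (exfalso; omega))
    · rw [if_neg hjq, hget k j (by simpa using hj)]
      have hne : (j : Int) ≠ (q : Int) := by exact_mod_cast fun h => hjq (by omega)
      rcases hk with hk | hk <;> unfold gChild <;> split_ifs <;>
        (first | rfl | (exfalso; omega))

lemma fold_Ledges (n : Int) : ∀ (m : Nat) (a : Int), 1 ≤ a → a ≤ n → (n - a).toNat = m →
    (PySem.List.pyRange a n 1).foldl bStep (Ledges n a) = Ledges n n := by
  intro m
  induction m with
  | zero =>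
    intro a h1 h2 hm
    have : a = n := by omega
    subst this
    rw [PySem.List.pyRange_one_eq_nil (by omega)]
    rfl
  | succ m ih =>
    intro a h1 h2 hm
    have han : a < n := by omega
    rw [PySem.List.pyRange_one_cons han]
    simp only [List.foldl_cons]
    rw [bStep_Ledges n a h1 han]
    exact ih (a + 1) (by omega) (by omega) (by omega)

lemma gen_ncb_alt_eq_Ledges (n : Int) : gen_ncb_alt n = Ledges n n := by
  unfold gen_ncb_alt
  rw [init_eq_Ledges]
  by_cases hn : 1 ≤ n
  · exact fold_Ledges n (n - 1).toNat 1 le_rfl hn (by omega)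
  · rw [PySem.List.pyRange_one_eq_nil (by omega)]
    simp only [List.foldl_nil]
    unfold Ledges
    rw [PySem.List.pyRange_one_eq_nil (by omega)]
    simp

-- ===== VERDICT (by name: the statement is the Claim_ definition above) =====
theorem gen_ncb_spec : Claim_equal_gen_ncb := by
  intro n _
  unfold Spec_gen_ncb
  rw [gen_ncb_eq_Ledges, gen_ncb_alt_eq_Ledges]
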